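-- pv_equiv track=rewrite | github.com/PervasiveWellbeingTech/Ultraslow-ChairPrograms | vibrator/newht.py | combineAudio
-- ===== SOURCE A (Python) =====
-- def combineAudio(audioList, multiply=False, add=False):
--     """Returns an list where each element is the product/sum of each element of the lists in audioList
--        eg. if the input is [[a,b,c],[d,e,f]] and multiply is set to True the output would be [a*d, b*e, f*c]
--     :param audioList: List of audio samples, must be same length
--     :param multiply: Set to True to multiply data points
--     :param add: Set to True to add data points
--     Raises IndexError when lists are not the same length
--     Raises ValueError if multiply and add are the same values
--     """
--     if multiply==add:
--         raise ValueError("multiply and add cannot be the same value")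
--     if multiply:
--         newAudio = [1]*len(audioList[0])
--     if add:
--         newAudio = [0]*len(audioList[0])
--     for i in range(len(audioList[0])):
--         for j in range(len(audioList)):
--             if multiply:
--                 newAudio[i] = audioList[j][i]*newAudio[i]
--             if add:
--                 newAudio[i] = audioList[j][i]+newAudio[i]
--     return newAudio
-- ===== SOURCE B (Python) =====
-- def combineAudio(audioList, multiply=False, add=False):
--     if multiply == add:
--         raise ValueError("multiply and add cannot be the same value")
--     op = (lambda x, y: x * y) if multiply else (lambda x, y: x + y)
--     acc = list(audioList[0])
--     for row in audioList[1:]: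
--         acc = [op(a, x) for a, x in zip(acc, row)]
--     return acc
-- ===== Notes on version B (the rewrite author's own statement) =====
-- stated objective: simpler
-- what changed: Replaces A's column-outer nested index loops over a pre-seeded identity accumulator array with a row-wise fold: start from a copy of the first row and zip-combine each subsequent row into the accumulator, no indexing at all.
import Mathlib
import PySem

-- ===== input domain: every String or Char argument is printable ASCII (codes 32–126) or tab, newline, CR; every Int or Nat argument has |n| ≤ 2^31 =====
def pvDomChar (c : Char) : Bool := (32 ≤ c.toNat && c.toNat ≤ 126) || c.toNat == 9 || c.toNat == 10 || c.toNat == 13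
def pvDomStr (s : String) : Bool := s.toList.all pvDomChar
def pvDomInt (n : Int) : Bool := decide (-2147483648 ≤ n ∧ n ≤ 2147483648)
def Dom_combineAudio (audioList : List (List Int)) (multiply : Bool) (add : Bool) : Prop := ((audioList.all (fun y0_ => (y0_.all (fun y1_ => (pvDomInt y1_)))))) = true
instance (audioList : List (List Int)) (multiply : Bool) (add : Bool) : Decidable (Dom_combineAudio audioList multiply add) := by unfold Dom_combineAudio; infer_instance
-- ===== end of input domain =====

-- B folds row-wise (zip-combining each row into an accumulator seeded with the first row)
-- instead of A's column-outer nested index loops; objective: simpler, same cost.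


-- ===== PORT A =====
-- Literal port of A. Under Pre_ every index is in range, so audioList[j][i] is ported by
-- List.getD (exact there); the multiply==add ValueError case (excluded by Pre_) returns [].
def combineAudio (audioList : List (List Int)) (multiply : Bool) (add : Bool) : List Int :=
  if multiply = add then []                          -- raise ValueError (outside Pre_)
  else
    let n := (audioList.headD []).length             -- len(audioList[0])
    let newAudio : List Int := []
    let newAudio := if multiply then List.replicate n (1 : Int) else newAudio
    let newAudio := if add then List.replicate n (0 : Int) else newAudio
    (List.range n).foldl (fun newAudio i =>
      (List.range audioList.length).foldl (fun newAudio j =>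
        let newAudio :=
          if multiply then newAudio.set i (((audioList.getD j []).getD i 0) * newAudio.getD i 0)
          else newAudio
        if add then newAudio.set i (((audioList.getD j []).getD i 0) + newAudio.getD i 0)
        else newAudio) newAudio) newAudio

-- ===== PORT B =====
-- Literal port of Source B: fold the rows after the first into an accumulator seeded with
-- the first row, combining element-wise via zip.
def combineAudio_alt (audioList : List (List Int)) (multiply : Bool) (add : Bool) : List Int :=
  if multiply = add then []                          -- raise ValueError (outside Pre_)
  else
    let op : Int → Int → Int := if multiply then (· * ·) else (· + ·)
    (audioList.drop 1).foldl
      (fun acc row => (acc.zip row).map (fun p => op p.1 p.2))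
      (audioList.headD [])

-- ===== PRECONDITION & SPEC =====
-- Exactly where Python A returns: multiply ≠ add (else ValueError), audioList nonempty
-- (else IndexError at audioList[0]), and every row at least as long as row 0 (else IndexError).
def Pre_combineAudio (audioList : List (List Int)) (multiply : Bool) (add : Bool) : Prop :=
  multiply ≠ add ∧ audioList ≠ [] ∧
    ∀ row ∈ audioList, (audioList.headD []).length ≤ row.length
instance (audioList : List (List Int)) (multiply : Bool) (add : Bool) : Decidable (Pre_combineAudio audioList multiply add) := by unfold Pre_combineAudio; infer_instance
def pvWitness_combineAudio : List (List Int) × Bool × Bool := ([[1, 2], [3, 4]], true, false)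

def Spec_combineAudio (audioList : List (List Int)) (multiply : Bool) (add : Bool) (out : List Int) : Prop := out = combineAudio_alt audioList multiply add
instance (audioList : List (List Int)) (multiply : Bool) (add : Bool) (out : List Int) : Decidable (Spec_combineAudio audioList multiply add out) := by unfold Spec_combineAudio; infer_instance

-- ===== CLAIM (what is proved, stated in full; the proofs are below) =====
def Claim_equal_combineAudio : Prop := ∀ (audioList : List (List Int)) (multiply : Bool) (add : Bool), Dom_combineAudio audioList multiply add → Pre_combineAudio audioList multiply add → Spec_combineAudio audioList multiply add (combineAudio audioList multiply add)

-- ===== LEMMAS AND PROOFS =====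

-- Setting just past a prefix acts on the suffix's head.
lemma set_append_len (A rest : List Int) (x : Int) :
    (A ++ rest).set A.length x = A ++ rest.set 0 x := by
  induction A with
  | nil => simp
  | cons a t ih => simp [ih]

-- Inner loop of A: repeatedly overwriting index i composes into one set at i.
lemma foldl_set_i (g : Int → Nat → Int) (l : List Nat) (i : Nat) :
    ∀ acc : List Int, i < acc.length →
      l.foldl (fun a j => a.set i (g (a.getD i 0) j)) acc
        = acc.set i (l.foldl g (acc.getD i 0)) := by
  induction l with
  | nil =>
    intro acc h
    simp [List.getD, List.getElem?_eq_getElem h]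
  | cons j t ih =>
    intro acc h
    simp only [List.foldl_cons]
    rw [ih _ (by simpa using h)]
    simp [List.set_set, List.getD, h]

-- Outer loop of A: setting each index of a replicate in order yields a map over range.
lemma foldl_range_set (step : List Int → Nat → List Int) (F : Nat → Int → Int) (c : Int)
    (hstep : ∀ (acc : List Int) (i : Nat), i < acc.length →
      step acc i = acc.set i (F i (acc.getD i 0))) :
    ∀ n m, n ≤ m →
      (List.range n).foldl step (List.replicate m c)
        = (List.range n).map (fun i => F i c) ++ List.replicate (m - n) c := by
  intro n
  induction n with
  | zero => intro m _; simp
  | succ n ih =>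
    intro m hnm
    rw [List.range_succ, List.foldl_append, ih m (Nat.le_of_succ_le hnm)]
    simp only [List.foldl_cons, List.foldl_nil]
    have hmn : n < m := hnm
    set P := (List.range n).map (fun i => F i c) ++ List.replicate (m - n) c with hP
    have hlenmap : ((List.range n).map (fun i => F i c)).length = n := by simp
    have hlen : P.length = m := by simp [hP]; omega
    have hrep : List.replicate (m - n) c = c :: List.replicate (m - (n + 1)) c := by
      have : m - n = (m - (n + 1)) + 1 := by omega
      rw [this, List.replicate_succ]
    rw [hstep P n (by omega)]
    have hget : P.getD n 0 = c := by
      rw [hP, List.getD, List.getElem?_append_right (by simp)]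
      simp [hrep]
    rw [hget]
    have hset : P.set n (F n c)
        = (List.range n).map (fun i => F i c) ++ (F n c :: List.replicate (m - (n + 1)) c) := by
      rw [hP, hrep]
      have := set_append_len ((List.range n).map (fun i => F i c))
        (c :: List.replicate (m - (n + 1)) c) (F n c)
      rw [hlenmap] at this
      rw [this]
      simp
    rw [hset]
    simp

-- Indexing a list over its range reproduces it.
lemma map_range_getD {α : Type} (l : List α) (d : α) :
    (List.range l.length).map (fun j => l.getD j d) = l := by
  apply List.ext_getElem
  · simp
  · intro i h1 h2
    simp [List.getD, List.getElem?_eq_getElem h2]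

-- One zip-combine step is a pointwise map over the accumulator's index range.
lemma zipmap_char (op : Int → Int → Int) (acc row : List Int) (h : acc.length ≤ row.length) :
    (acc.zip row).map (fun p => op p.1 p.2)
      = (List.range acc.length).map (fun i => op (acc.getD i 0) (row.getD i 0)) := by
  apply List.ext_getElem
  · simp; omega
  · intro i h1 h2
    have hi : i < acc.length := by simp at h1; omega
    simp [List.getD, List.getElem?_eq_getElem, hi, Nat.lt_of_lt_of_le hi h]

-- B's row fold computes, at each index, the fold of that column.
lemma rowfold_char (op : Int → Int → Int) (rows : List (List Int)) (n : Nat) :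
    ∀ acc : List Int, acc.length = n → (∀ row ∈ rows, n ≤ row.length) →
      rows.foldl (fun acc row => (acc.zip row).map (fun p => op p.1 p.2)) acc
        = (List.range n).map (fun i =>
            rows.foldl (fun x row => op x (row.getD i 0)) (acc.getD i 0)) := by
  induction rows with
  | nil =>
    intro acc hlen _
    subst hlen
    simp only [List.foldl_nil]
    exact (map_range_getD acc 0).symm
  | cons r t ih =>
    intro acc hlen hrows
    simp only [List.foldl_cons]
    rw [zipmap_char op acc r (by rw [hlen]; exact hrows r (by simp)), hlen]
    rw [ih _ (by simp) (fun row hm => hrows row (by simp [hm]))]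
    refine List.map_congr_left (fun i hi => ?_)
    have hin : i < n := List.mem_range.mp hi
    congr 1
    simp [List.getD, hin]

-- A's column value equals a fold over the rows themselves.
lemma colfold_rows (op : Int → Int → Int) (al : List (List Int)) (i : Nat) (c : Int) :
    (List.range al.length).foldl (fun x j => op x ((al.getD j []).getD i 0)) c
      = al.foldl (fun x row => op x (row.getD i 0)) c := by
  conv_rhs => rw [← map_range_getD al []]
  rw [List.foldl_map]

-- ===== VERDICT (by name: the statement is the Claim_ definition above) =====
theorem combineAudio_spec : Claim_equal_combineAudio := by
  intro al mul ad _ hpre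
  obtain ⟨hne, hnil, hlenrows⟩ := hpre
  obtain ⟨r0, t, rfl⟩ : ∃ r0 t, al = r0 :: t := by
    cases al with
    | nil => exact absurd rfl hnil
    | cons r0 t => exact ⟨r0, t, rfl⟩
  unfold Spec_combineAudio combineAudio combineAudio_alt
  have hrows : ∀ row ∈ t, r0.length ≤ row.length := by
    intro row hm; simpa using hlenrows row (by simp [hm])
  cases mul <;> cases ad <;> simp only [] at hne ⊢
  · exact absurd rfl hne
  · -- add case: multiply = false, add = true
    simp only [Bool.false_eq_true, reduceIte, List.headD_cons, List.drop_succ_cons,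
      List.drop_zero]
    rw [foldl_range_set _
      (fun i x => (List.range (r0 :: t).length).foldl
        (fun x j => ((r0 :: t).getD j []).getD i 0 + x) x) 0
      (fun acc i hi => foldl_set_i _ _ _ acc hi) _ _ le_rfl]
    simp only [Nat.sub_self, List.replicate_zero, List.append_nil]
    rw [rowfold_char _ t r0.length r0 rfl hrows]
    refine List.map_congr_left (fun i hi => ?_)
    have hcomm : (fun (x : Int) (j : Nat) => ((r0 :: t).getD j []).getD i 0 + x)
        = (fun (x : Int) (j : Nat) => x + ((r0 :: t).getD j []).getD i 0) := by
      funext x j; exact add_comm _ _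
    rw [hcomm, colfold_rows (· + ·) (r0 :: t) i 0]
    simp
  · -- multiply case: multiply = true, add = false
    simp only [Bool.false_eq_true, Bool.true_eq_false, reduceIte, List.headD_cons,
      List.drop_succ_cons, List.drop_zero]
    rw [foldl_range_set _
      (fun i x => (List.range (r0 :: t).length).foldl
        (fun x j => ((r0 :: t).getD j []).getD i 0 * x) x) 1
      (fun acc i hi => foldl_set_i _ _ _ acc hi) _ _ le_rfl]
    simp only [Nat.sub_self, List.replicate_zero, List.append_nil]
    rw [rowfold_char _ t r0.length r0 rfl hrows]
    refine List.map_congr_left (fun i hi => ?_)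
    have hcomm : (fun (x : Int) (j : Nat) => ((r0 :: t).getD j []).getD i 0 * x)
        = (fun (x : Int) (j : Nat) => x * ((r0 :: t).getD j []).getD i 0) := by
      funext x j; exact mul_comm _ _
    rw [hcomm, colfold_rows (· * ·) (r0 :: t) i 1]
    simp
  · exact absurd rfl hne
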